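-- pv_equiv track=rewrite | github.com/Me0n4ik/Kleho | tab2_uv/uv_system_tab.py | generate_alternative_systems
-- ===== SOURCE A (Python) =====
-- def generate_alternative_systems(text):
--     """Генерирует все возможные варианты системы неравенств"""
--     inequalities = [line.strip() for line in text.split('\n')
--                    if line.strip()]
--     n = len(inequalities)
--     alternative_systems = []
--
--     # Перебираем все возможные комбинации знаков
--     for i in range(2**n):
--         new_system = []
--         for j, ineq in enumerate(inequalities):
--             # Определяем, нужно ли менять знак для данного неравенства
--             flip = (i >> j) & 1
--             if flip:
--                 # Меняем знак неравенства
--                 if '>=' in ineq: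
--                     new_ineq = ineq.replace('>=', '<=')
--                 elif '<=' in ineq:
--                     new_ineq = ineq.replace('<=', '>=')
--                 elif '>' in ineq:
--                     new_ineq = ineq.replace('>', '<')
--                 elif '<' in ineq:
--                     new_ineq = ineq.replace('<', '>')
--             else:
--                 new_ineq = ineq
--
--             new_system.append(new_ineq)
--
--         alternative_systems.append('\n'.join(new_system))
--
--     return alternative_systems
-- ===== SOURCE B (Python) =====
-- def generate_alternative_systems(text):
--     """Генерирует все возможные варианты системы неравенств"""
--     def flip(ineq):
--         if '>=' in ineq:
--             return ineq.replace('>=', '<=')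
--         if '<=' in ineq:
--             return ineq.replace('<=', '>=')
--         if '>' in ineq:
--             return ineq.replace('>', '<')
--         if '<' in ineq:
--             return ineq.replace('<', '>')
--         return ineq
--
--     pairs = [(s, flip(s)) for s in map(str.strip, text.split('\n')) if s]
--
--     # build all sign combinations back-to-front; inequality 0 varies fastest
--     combos = [[]]
--     for orig, flipped in reversed(pairs):
--         combos = [[choice] + rest for rest in combos for choice in (orig, flipped)]
--     return ['\n'.join(c) for c in combos]
-- ===== Notes on version B (the rewrite author's own statement) =====
-- stated objective: alternative
-- what changed: B computes each line's flipped form once and generates the 2^n systems with a product-style fold over (original, flipped) pairs built back-to-front (inequality 0 varying fastest), instead of A's nested loops that re-scan and re-flip every line for each bitmask while threading a stale new_ineq variable.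
-- intended difference: On texts whose nonempty stripped lines number at least two, are not all identical, and include a line with no comparison operator, A silently substitutes the previously appended line for that line whenever its flip bit is set (Python's new_ineq keeps its value from the previous loop iteration), while B keeps an operator-free line unchanged, which is the intended value for a line that has no sign to flip. — e.g. on generate_alternative_systems("a>b\nc"): A returns ["a>b\nc", "a<b\nc", "a>b\na>b", "a<b\na<b"], B returns ["a>b\nc", "a<b\nc", "a>b\nc", "a<b\nc"]
import Mathlib
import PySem

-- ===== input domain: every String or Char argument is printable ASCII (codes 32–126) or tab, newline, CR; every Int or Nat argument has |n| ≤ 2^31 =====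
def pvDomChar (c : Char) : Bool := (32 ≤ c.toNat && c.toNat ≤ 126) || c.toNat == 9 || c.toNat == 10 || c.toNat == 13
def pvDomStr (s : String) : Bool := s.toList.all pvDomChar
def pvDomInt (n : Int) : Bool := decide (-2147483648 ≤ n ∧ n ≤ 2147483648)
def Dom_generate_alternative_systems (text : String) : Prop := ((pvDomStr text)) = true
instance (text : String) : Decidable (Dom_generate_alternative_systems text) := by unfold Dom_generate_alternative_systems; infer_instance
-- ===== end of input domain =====

-- B rebuilds the systems from once-computed (original, flipped) pairs by a product-style fold instead of
-- re-scanning and re-flipping every line for each of the 2^n bitmasks (objective: alternative; return value only).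

-- shared input parser (used by both ports and by D_): the nonempty stripped lines of the text,
-- Python's [line.strip() for line in text.split('\n') if line.strip()] in both Source A and Source B.
-- text.split('\n') is PySem.Str.split? (none only for sep = ""); the separator here is the literal "\n", so `.getD []` is never taken.
def pvLines (text : String) : List String :=
  (((PySem.Str.split? text "\n").getD []).map (fun line => PySem.Str.strip line)).filter (fun l => l ≠ "")

-- ===== PORT A =====
-- the inner loop's state is (new_system, new_ineq): Python's new_ineq variable survives across iterations
-- (both of j and of i), which is exactly the stale-value behaviour ported here; the `.getD ""` arm is
-- unreachable on inputs A returns on (iteration i = 0 always assigns new_ineq before any flip can read it).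
def generate_alternative_systems (text : String) : List String :=
  let inequalities := pvLines text
  let n := inequalities.length
  ((List.range (2 ^ n)).foldl
    (fun (st : List String × Option String) (i : Nat) =>
      let inner := inequalities.zipIdx.foldl
        (fun (st2 : List String × Option String) (p : String × Nat) =>
          let ineq := p.1
          let flip := (i >>> p.2) &&& 1
          let newIneq : Option String :=
            if flip = 1 then
              if PySem.Str.isIn ">=" ineq then some (PySem.Str.replace ineq ">=" "<=")
              else if PySem.Str.isIn "<=" ineq then some (PySem.Str.replace ineq "<=" ">=")
              else if PySem.Str.isIn ">" ineq then some (PySem.Str.replace ineq ">" "<")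
              else if PySem.Str.isIn "<" ineq then some (PySem.Str.replace ineq "<" ">")
              else st2.2
            else some ineq
          (st2.1 ++ [newIneq.getD ""], newIneq))
        ([], st.2)
      (st.1 ++ [PySem.Str.join "\n" inner.1], inner.2))
    ([], (none : Option String))).1

-- ===== PORT B =====
def pvFlip (ineq : String) : String :=
  if PySem.Str.isIn ">=" ineq then PySem.Str.replace ineq ">=" "<="
  else if PySem.Str.isIn "<=" ineq then PySem.Str.replace ineq "<=" ">="
  else if PySem.Str.isIn ">" ineq then PySem.Str.replace ineq ">" "<"
  else if PySem.Str.isIn "<" ineq then PySem.Str.replace ineq "<" ">"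
  else ineq

def generate_alternative_systems_alt (text : String) : List String :=
  let pairs := (pvLines text).map (fun s => (s, pvFlip s))
  let combos := pairs.reverse.foldl
    (fun (combos : List (List String)) (p : String × String) =>
      combos.flatMap (fun rest => [p.1 :: rest, p.2 :: rest]))
    [[]]
  combos.map (fun c => PySem.Str.join "\n" c)

-- ===== PRECONDITION & SPEC =====
-- On texts whose nonempty stripped lines number at least two, are not all identical, and include a line with
-- no comparison operator, A fills a flipped operator-free line with the previously appended line (the stale
-- new_ineq left over from the preceding loop iteration), while B keeps the line unchanged, which is the
-- intended value for a line that has no sign to flip.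
def D_generate_alternative_systems (text : String) : Prop :=
  2 ≤ (pvLines text).length ∧
  (∃ l ∈ pvLines text, PySem.Str.isIn ">" l = false ∧ PySem.Str.isIn "<" l = false) ∧
  ¬ (∀ l ∈ pvLines text, l = (pvLines text).headI)
instance (text : String) : Decidable (D_generate_alternative_systems text) := by
  unfold D_generate_alternative_systems; infer_instance

def Spec_generate_alternative_systems (text : String) (out : List String) : Prop :=
  ¬ D_generate_alternative_systems text → out = generate_alternative_systems_alt text
instance (text : String) (out : List String) : Decidable (Spec_generate_alternative_systems text out) := by
  unfold Spec_generate_alternative_systems; infer_instance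

def pvDiffWitness_generate_alternative_systems : String := "a>b\nc"
def pvDiffWitnessOut_generate_alternative_systems : (List String) × (List String) :=
  (["a>b\nc", "a<b\nc", "a>b\na>b", "a<b\na<b"],
   ["a>b\nc", "a<b\nc", "a>b\nc", "a<b\nc"])

-- ===== CLAIM (what is proved, stated in full; the proofs are below) =====
def Claim_unchanged_generate_alternative_systems : Prop := ∀ (text : String), Dom_generate_alternative_systems text → Spec_generate_alternative_systems text (generate_alternative_systems text)
def Claim_changed_generate_alternative_systems : Prop := Dom_generate_alternative_systems (pvDiffWitness_generate_alternative_systems) ∧ D_generate_alternative_systems (pvDiffWitness_generate_alternative_systems) ∧ generate_alternative_systems (pvDiffWitness_generate_alternative_systems) = pvDiffWitnessOut_generate_alternative_systems.1 ∧ generate_alternative_systems_alt (pvDiffWitness_generate_alternative_systems) = pvDiffWitnessOut_generate_alternative_systems.2 ∧ pvDiffWitnessOut_generate_alternative_systems.1 ≠ pvDiffWitnessOut_generate_alternative_systems.2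

-- ===== LEMMAS AND PROOFS =====

-- named copies of the two fold bodies (syntactically identical to the lambdas in the ports)
def pvStepA (i : Nat) (st2 : List String × Option String) (p : String × Nat) : List String × Option String :=
  let ineq := p.1
  let flip := (i >>> p.2) &&& 1
  let newIneq : Option String :=
    if flip = 1 then
      if PySem.Str.isIn ">=" ineq then some (PySem.Str.replace ineq ">=" "<=")
      else if PySem.Str.isIn "<=" ineq then some (PySem.Str.replace ineq "<=" ">=")
      else if PySem.Str.isIn ">" ineq then some (PySem.Str.replace ineq ">" "<")
      else if PySem.Str.isIn "<" ineq then some (PySem.Str.replace ineq "<" ">")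
      else st2.2
    else some ineq
  (st2.1 ++ [newIneq.getD ""], newIneq)

def pvStepB (combos : List (List String)) (p : String × String) : List (List String) :=
  combos.flatMap (fun rest => [p.1 :: rest, p.2 :: rest])

lemma portA_eq (text : String) :
    generate_alternative_systems text =
      ((List.range (2 ^ (pvLines text).length)).foldl
        (fun (st : List String × Option String) (i : Nat) =>
          let inner := (pvLines text).zipIdx.foldl (pvStepA i) ([], st.2)
          (st.1 ++ [PySem.Str.join "\n" inner.1], inner.2))
        ([], (none : Option String))).1 := rfl

lemma portB_eq (text : String) :
    generate_alternative_systems_alt text =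
      (((pvLines text).map (fun s => (s, pvFlip s))).reverse.foldl pvStepB [[]]).map
        (fun c => PySem.Str.join "\n" c) := rfl

def pvHasOp (l : String) : Bool := PySem.Str.isIn ">" l || PySem.Str.isIn "<" l

def pvSel (i : Nat) : List String → List String
  | [] => []
  | l :: L => (if i &&& 1 = 1 then pvFlip l else l) :: pvSel (i >>> 1) L

lemma isIn_ge_imp (l : String) (h : PySem.Str.isIn ">" l = false) : PySem.Str.isIn ">=" l = false := by
  rcases hge : PySem.Str.isIn ">=" l with _ | _
  · rfl
  · exfalso
    have h2 := (PySem.Str.isIn_iff_infix ">=" l).mp hge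
    have h3 : (">".toList) <:+: l.toList :=
      List.IsInfix.trans (by decide : (">".toList) <:+: (">=".toList)) h2
    have h4 := (PySem.Str.isIn_iff_infix ">" l).mpr h3
    rw [h] at h4; exact Bool.false_ne_true h4

lemma isIn_le_imp (l : String) (h : PySem.Str.isIn "<" l = false) : PySem.Str.isIn "<=" l = false := by
  rcases hge : PySem.Str.isIn "<=" l with _ | _
  · rfl
  · exfalso
    have h2 := (PySem.Str.isIn_iff_infix "<=" l).mp hge
    have h3 : ("<".toList) <:+: l.toList :=
      List.IsInfix.trans (by decide : ("<".toList) <:+: ("<=".toList)) h2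
    have h4 := (PySem.Str.isIn_iff_infix "<" l).mpr h3
    rw [h] at h4 ; exact Bool.false_ne_true h4

lemma chain_of_op (l : String) (prev : Option String) (h : pvHasOp l = true) :
    (if PySem.Str.isIn ">=" l then some (PySem.Str.replace l ">=" "<=")
     else if PySem.Str.isIn "<=" l then some (PySem.Str.replace l "<=" ">=")
     else if PySem.Str.isIn ">" l then some (PySem.Str.replace l ">" "<")
     else if PySem.Str.isIn "<" l then some (PySem.Str.replace l "<" ">")
     else prev) = some (pvFlip l) := by
  have h' := h
  unfold pvHasOp at h'
  simp only [Bool.or_eq_true] at h'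
  unfold pvFlip
  split_ifs with h1 h2 h3 h4
  · rfl
  · rfl
  · rfl
  · rfl
  · rcases h' with hx | hx
    · exact absurd hx h3
    · exact absurd hx h4

lemma getLast?_cons_or {α : Type} (c : α) (M : List α) :
    (c :: M).getLast? = M.getLast?.or (some c) := by
  induction M generalizing c with
  | nil => rfl
  | cons d M ih =>
    rw [List.getLast?_cons_cons, ih d, Option.or_assoc, Option.some_or]

lemma inner_allOp (i : Nat) :
    ∀ (L : List String), (∀ l ∈ L, pvHasOp l = true) →
    ∀ (k : Nat) (acc : List String) (prev : Option String),
      (L.zipIdx k).foldl (pvStepA i) (acc, prev) =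
        (acc ++ pvSel (i >>> k) L, ((pvSel (i >>> k) L).getLast?).or prev) := by
  intro L
  induction L with
  | nil => intro _ k acc prev; simp [pvSel]
  | cons l L ih =>
    intro hop k acc prev
    have hl : pvHasOp l = true := hop l (List.mem_cons_self)
    have hop' : ∀ x ∈ L, pvHasOp x = true := fun x hx => hop x (List.mem_cons_of_mem _ hx)
    rw [List.zipIdx_cons, List.foldl_cons]
    have hstep : pvStepA i (acc, prev) (l, k)
        = (acc ++ [if (i >>> k) &&& 1 = 1 then pvFlip l else l],
           some (if (i >>> k) &&& 1 = 1 then pvFlip l else l)) := by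
      have hchain := chain_of_op l prev hl
      by_cases hf : (i >>> k) &&& 1 = 1
      · simp only [pvStepA, if_pos hf, hchain, Option.getD_some]
      · simp only [pvStepA, if_neg hf, Option.getD_some]
    rw [hstep, ih hop' (k + 1) _ _, show i >>> (k + 1) = (i >>> k) >>> 1 from Nat.shiftRight_add i k 1]
    simp [pvSel, getLast?_cons_or, Option.some_or]

lemma outer_allOp (L : List String) (hop : ∀ l ∈ L, pvHasOp l = true) (m : Nat) :
    (((List.range m).foldl
      (fun (st : List String × Option String) (i : Nat) =>
        let inner := L.zipIdx.foldl (pvStepA i) ([], st.2)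
        (st.1 ++ [PySem.Str.join "\n" inner.1], inner.2))
      ([], (none : Option String)))).1
    = (List.range m).map (fun i => PySem.Str.join "\n" (pvSel i L)) := by
  induction m with
  | zero => simp
  | succ m ih =>
    rw [List.range_succ, List.foldl_append, List.foldl_cons, List.foldl_nil, List.map_append, ih]
    simp only [inner_allOp m L hop 0 [] _, Nat.shiftRight_zero, List.nil_append]
    simp

lemma pvRangeTwoMul (m : Nat) :
    List.range (2 * m) = (List.range m).flatMap (fun r => [2 * r, 2 * r + 1]) := by
  induction m with
  | zero => rfl
  | succ m ih =>
    have h2 : 2 * (m + 1) = (2 * m) + 1 + 1 := by omega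
    rw [h2, List.range_succ, List.range_succ, ih, List.range_succ, List.flatMap_append]
    simp

lemma pvSel_even (r : Nat) (l : String) (L : List String) :
    pvSel (2 * r) (l :: L) = l :: pvSel r L := by
  have h1 : (2 * r) &&& 1 = 0 := by simp [Nat.and_one_is_mod]
  have h2 : (2 * r) >>> 1 = r := by simp [Nat.shiftRight_one]
  simp [pvSel, h1, h2]

lemma pvSel_odd (r : Nat) (l : String) (L : List String) :
    pvSel (2 * r + 1) (l :: L) = pvFlip l :: pvSel r L := by
  have h1 : (2 * r + 1) &&& 1 = 1 := by simp [Nat.and_one_is_mod]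
  have h2 : (2 * r + 1) >>> 1 = r := by simp [Nat.shiftRight_one]; omega
  simp [pvSel, h1, h2]

lemma bfold_eq (L : List String) :
    ((L.map (fun s => (s, pvFlip s))).reverse.foldl pvStepB [[]])
      = (List.range (2 ^ L.length)).map (fun i => pvSel i L) := by
  induction L with
  | nil => simp [pvSel, List.range_one]
  | cons l L ih =>
    rw [List.map_cons, List.reverse_cons, List.foldl_append, ih, List.foldl_cons, List.foldl_nil]
    have hp : 2 ^ (l :: L).length = 2 * 2 ^ L.length := by
      rw [List.length_cons]; ring
    rw [hp, pvRangeTwoMul, List.map_flatMap]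
    rw [show pvStepB ((List.range (2 ^ L.length)).map fun i => pvSel i L) (l, pvFlip l)
          = (List.range (2 ^ L.length)).flatMap (fun r => [l :: pvSel r L, pvFlip l :: pvSel r L]) by
        simp [pvStepB, List.flatMap_map]]
    refine List.flatMap_congr (fun r _ => ?_)
    rw [List.map_cons, List.map_cons, List.map_nil, pvSel_even, pvSel_odd]

lemma pvFlip_noOp (l : String) (h : pvHasOp l = false) : pvFlip l = l := by
  unfold pvHasOp at h
  have hgt : PySem.Str.isIn ">" l = false := by
    cases hx : PySem.Str.isIn ">" l <;> simp_all
  have hlt : PySem.Str.isIn "<" l = false := by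
    cases hx : PySem.Str.isIn "<" l <;> simp_all
  unfold pvFlip
  rw [isIn_ge_imp l hgt, isIn_le_imp l hlt, hgt, hlt]
  rfl

lemma pvSel_const (l : String) (h : pvHasOp l = false) :
    ∀ (L : List String), (∀ x ∈ L, x = l) → ∀ i, pvSel i L = L := by
  intro L
  induction L with
  | nil => intro _ i; rfl
  | cons x L ih =>
    intro hx i
    have hxl : x = l := hx x (by simp)
    have := ih (fun y hy => hx y (by simp [hy])) (i >>> 1)
    simp only [pvSel, this, hxl, pvFlip_noOp l h]
    split <;> rfl

lemma inner_const (l : String) (hop : pvHasOp l = false) (i : Nat) :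
    ∀ (M : List String), (∀ x ∈ M, x = l) → ∀ (k : Nat) (acc : List String),
      (M.zipIdx k).foldl (pvStepA i) (acc, some l) = (acc ++ M, some l) := by
  intro M
  induction M with
  | nil => intro _ k acc; simp
  | cons x M ih =>
    intro hx k acc
    have hxl : x = l := hx x List.mem_cons_self
    have hgtlt : PySem.Str.isIn ">" l = false ∧ PySem.Str.isIn "<" l = false := by
      simpa [pvHasOp] using hop
    subst hxl
    rw [List.zipIdx_cons, List.foldl_cons]
    have hstep : pvStepA i (acc, some x) (x, k) = (acc ++ [x], some x) := by
      by_cases hf : (i >>> k) &&& 1 = 1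
      · simp only [pvStepA, if_pos hf, hgtlt.1, hgtlt.2, isIn_ge_imp x hgtlt.1,
          isIn_le_imp x hgtlt.2, Bool.false_eq_true, if_false, Option.getD_some]
      · simp only [pvStepA, if_neg hf, Option.getD_some]
    rw [hstep, ih (fun y hy => hx y (List.mem_cons_of_mem _ hy)) (k + 1) (acc ++ [x])]
    simp

lemma inner_zero_const (l : String) :
    ∀ (M : List String), (∀ x ∈ M, x = l) → ∀ (k : Nat) (acc : List String) (prev : Option String),
      (M.zipIdx k).foldl (pvStepA 0) (acc, prev) = (acc ++ M, if M.isEmpty then prev else some l) := by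
  intro M
  induction M with
  | nil => intro _ k acc prev; simp
  | cons x M ih =>
    intro hx k acc prev
    have hxl : x = l := hx x List.mem_cons_self
    rw [List.zipIdx_cons, List.foldl_cons]
    have hstep : pvStepA 0 (acc, prev) (x, k) = (acc ++ [x], some x) := by
      simp [pvStepA, Nat.zero_shiftRight]
    rw [hstep, ih (fun y hy => hx y (List.mem_cons_of_mem _ hy)) (k + 1) (acc ++ [x]) (some x)]
    subst hxl
    cases M <;> simp

lemma outer_const (L : List String) (l : String) (hL : L ≠ []) (heq : ∀ x ∈ L, x = l)
    (hop : pvHasOp l = false) :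
    ∀ (m : Nat), 1 ≤ m →
      ((List.range m).foldl
        (fun (st : List String × Option String) (i : Nat) =>
          let inner := L.zipIdx.foldl (pvStepA i) ([], st.2)
          (st.1 ++ [PySem.Str.join "\n" inner.1], inner.2))
        ([], (none : Option String)))
      = ((List.range m).map (fun _ => PySem.Str.join "\n" L), some l) := by
  intro m hm
  induction m, hm using Nat.le_induction with
  | base =>
    rw [List.range_one, List.foldl_cons, List.foldl_nil]
    simp only [inner_zero_const l L heq 0 [] none, List.nil_append]
    rcases L with _ | ⟨a, M⟩
    · exact absurd rfl hL
    · simp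
  | succ m hm ih =>
    rw [List.range_succ, List.foldl_append, ih, List.foldl_cons, List.foldl_nil]
    simp only [inner_const l hop m L heq 0 [], List.nil_append, List.map_append]
    simp

-- ===== VERDICT (by name: the statement is the Claim_ definition above) =====
theorem generate_alternative_systems_spec : Claim_unchanged_generate_alternative_systems := by
  intro text _ hnD
  rw [portA_eq, portB_eq, bfold_eq]
  by_cases hop : ∀ l ∈ pvLines text, pvHasOp l = true
  · rw [outer_allOp (pvLines text) hop, List.map_map]
    rfl
  · push_neg at hop
    obtain ⟨x, hxL, hxop⟩ := hop
    have hxop' : pvHasOp x = false := by cases h : pvHasOp x <;> simp_all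
    have hgtlt : PySem.Str.isIn ">" x = false ∧ PySem.Str.isIn "<" x = false := by
      simpa [pvHasOp] using hxop'
    have hex : ∃ l ∈ pvLines text, PySem.Str.isIn ">" l = false ∧ PySem.Str.isIn "<" l = false :=
      ⟨x, hxL, hgtlt⟩
    have hLne : pvLines text ≠ [] := List.ne_nil_of_mem hxL
    have hall : ∀ l ∈ pvLines text, l = (pvLines text).headI := by
      by_cases hlen : 2 ≤ (pvLines text).length
      · by_contra hne
        exact hnD ⟨hlen, hex, hne⟩
      · have h1 : (pvLines text).length = 1 := by
          have := List.length_pos_of_mem hxL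
          omega
        rcases hL : pvLines text with _ | ⟨a, _ | _⟩ <;> simp_all
    have hheadop : pvHasOp (pvLines text).headI = false := by
      rw [← hall x hxL]; exact hxop'
    have ho := outer_const (pvLines text) (pvLines text).headI hLne hall hheadop
      (2 ^ (pvLines text).length) Nat.one_le_two_pow
    rw [ho, List.map_map]
    refine List.map_congr_left (fun i _ => ?_)
    rw [Function.comp_apply, pvSel_const (pvLines text).headI hheadop (pvLines text) hall i]

theorem generate_alternative_systems_changed : Claim_changed_generate_alternative_systems := by
  unfold Claim_changed_generate_alternative_systems; decide
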